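-- pv_equiv track=rewrite | github.com/jepuli124/FirstSelfMadeAI | main.py | numberParser
-- ===== SOURCE A (Python) =====
-- def numberParser(mapSize: str) -> list:
--     listOfNumbers = []
--     state = 0
--     for character in mapSize:
--         try:
--             number = int(character)
--             if state % 2 == 0:
--                 state += 1
--                 listOfNumbers.append(0)
--             listOfNumbers[-1] = listOfNumbers[-1]*10 + number
--         except:
--             if state % 2 == 1:
--                 state += 1
--
--     return listOfNumbers
-- ===== SOURCE B (Python) =====
-- def numberParser(mapSize: str) -> list:
--     result = []
--     i = 0
--     n = len(mapSize)
--     while i < n: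
--         if '0' <= mapSize[i] <= '9':
--             j = i
--             while j < n and '0' <= mapSize[j] <= '9':
--                 j += 1
--             result.append(int(mapSize[i:j]))
--             i = j
--         else:
--             i += 1
--     return result
-- ===== Notes on version B (the rewrite author's own statement) =====
-- stated objective: faster
-- what changed: B scans maximal digit runs with two pointers and converts each whole run with one int() call, instead of A's per-character state-parity machine that mutates the last list element and relies on try/except per character.
import Mathlib
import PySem

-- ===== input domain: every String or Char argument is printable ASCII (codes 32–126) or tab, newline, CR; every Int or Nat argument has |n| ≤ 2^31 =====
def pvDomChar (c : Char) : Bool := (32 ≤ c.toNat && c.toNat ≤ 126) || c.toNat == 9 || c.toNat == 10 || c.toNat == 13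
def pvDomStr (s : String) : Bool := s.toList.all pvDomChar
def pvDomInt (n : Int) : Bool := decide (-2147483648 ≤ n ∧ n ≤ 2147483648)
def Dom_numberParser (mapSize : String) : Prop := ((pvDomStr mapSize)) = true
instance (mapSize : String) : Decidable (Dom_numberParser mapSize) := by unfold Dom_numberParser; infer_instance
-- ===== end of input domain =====

-- B scans maximal digit runs and converts each run at once, instead of A's per-character
-- state-parity machine; a genuinely different decomposition, measurably faster by a constant factor (avoids per-char exceptions).


-- ===== PORT A =====
-- int(character) succeeds for a single char exactly on '0'..'9' over the ASCII domain
def pvIsDig (c : Char) : Bool := 48 ≤ c.toNat && c.toNat ≤ 57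
def pvDv (c : Char) : Int := (c.toNat : Int) - 48

-- transliteration of `listOfNumbers[-1] = listOfNumbers[-1]*10 + number`
-- ([] is Python's IndexError case; unreachable in numberParser, whose list is nonempty here)
def pvUpdateLast : List Int → Int → List Int
  | [], _ => []
  | [x], n => [x * 10 + n]
  | x :: y :: xs, n => x :: pvUpdateLast (y :: xs) n

def pvStepA (st : List Int × Int) (c : Char) : List Int × Int :=
  if pvIsDig c then
    let st' := if PySem.Int.mod st.2 2 == 0 then (st.1 ++ [(0 : Int)], st.2 + 1) else st
    (pvUpdateLast st'.1 (pvDv c), st'.2)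
  else
    if PySem.Int.mod st.2 2 == 1 then (st.1, st.2 + 1) else st

def numberParser (mapSize : String) : List Int :=
  (mapSize.toList.foldl pvStepA ([], 0)).1

-- ===== PORT B =====
-- int() applied to a nonempty all-digit run is the base-10 fold (exact on that domain)
def pvRunToInt (ds : List Char) : Int := ds.foldl (fun a c => a * 10 + pvDv c) 0

-- B's outer loop; the inner `while j` pointer scan is the takeWhile/dropWhile run boundary
def pvGoB : List Char → List Int
  | [] => []
  | c :: cs =>
    if h : pvIsDig c then
      pvRunToInt ((c :: cs).takeWhile pvIsDig) :: pvGoB ((c :: cs).dropWhile pvIsDig)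
    else pvGoB cs
termination_by l => l.length
decreasing_by
  · simp [h]
    exact List.length_dropWhile_le _ _
  · simp

def numberParser_alt (mapSize : String) : List Int := pvGoB mapSize.toList

-- ===== PRECONDITION & SPEC =====
def Spec_numberParser (mapSize : String) (out : List Int) : Prop := out = numberParser_alt mapSize
instance (mapSize : String) (out : List Int) : Decidable (Spec_numberParser mapSize out) := by unfold Spec_numberParser; infer_instance

-- ===== CLAIM (what is proved, stated in full; the proofs are below) =====
def Claim_equal_numberParser : Prop := ∀ (mapSize : String), Dom_numberParser mapSize → Spec_numberParser mapSize (numberParser mapSize)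

-- ===== LEMMAS AND PROOFS =====

-- "currently inside a run, last element is v": extends v by the leading digit run, then continues as pvGoB
def pvExt (v : Int) : List Char → List Int
  | [] => [v]
  | c :: cs => if pvIsDig c then pvExt (v * 10 + pvDv c) cs else v :: pvGoB cs

theorem pvUpdateLast_append (lst : List Int) (v n : Int) :
    pvUpdateLast (lst ++ [v]) n = lst ++ [v * 10 + n] := by
  induction lst with
  | nil => rfl
  | cons x xs ih =>
    cases xs with
    | nil => rfl
    | cons y ys => simpa [pvUpdateLast] using ih

theorem pvExt_eq (cs : List Char) : ∀ v : Int,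
    pvExt v cs = (cs.takeWhile pvIsDig).foldl (fun a c => a * 10 + pvDv c) v
      :: pvGoB (cs.dropWhile pvIsDig) := by
  induction cs with
  | nil => intro v; simp [pvExt, pvGoB]
  | cons d ds ih =>
    intro v
    by_cases hd : pvIsDig d = true
    · rw [pvExt]
      simp only [hd, if_true, List.takeWhile_cons, List.dropWhile_cons]
      rw [ih (v * 10 + pvDv d)]
      simp
    · simp [pvExt, hd, pvGoB]

theorem pvGoB_cons_dig {c : Char} (cs : List Char) (h : pvIsDig c = true) :
    pvGoB (c :: cs) = pvExt (pvDv c) cs := by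
  rw [pvGoB, pvExt_eq]
  simp [h, pvRunToInt]

theorem pvKey (cs : List Char) :
    (∀ lst (st : Int), PySem.Int.mod st 2 = 0 →
        (cs.foldl pvStepA (lst, st)).1 = lst ++ pvGoB cs)
    ∧ (∀ lst (v st : Int), PySem.Int.mod st 2 = 1 →
        (cs.foldl pvStepA (lst ++ [v], st)).1 = lst ++ pvExt v cs) := by
  induction cs with
  | nil => constructor <;> intros <;> simp [pvGoB, pvExt]
  | cons c cs ih =>
    have hmod : ∀ st : Int, PySem.Int.mod st 2 = st % 2 :=
      fun st => PySem.Int.mod_eq_emod_of_pos (by omega)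
    constructor
    · intro lst st hst
      have hst' : st % 2 = 0 := by rwa [hmod] at hst
      by_cases h : pvIsDig c = true
      · have hdvd : (2 : Int) ∣ st := by omega
        have hstep : pvStepA (lst, st) c = (lst ++ [pvDv c], st + 1) := by
          simp [pvStepA, h, hdvd, pvUpdateLast_append]
        rw [List.foldl_cons, hstep, ih.2 lst (pvDv c) (st + 1) (by rw [hmod]; omega),
          pvGoB_cons_dig cs h]
      · have hnd : ¬ (2 : Int) ∣ (st - 1) := by omega
        have hstep : pvStepA (lst, st) c = (lst, st) := by
          simp [pvStepA, h]
          omega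
        rw [List.foldl_cons, hstep, ih.1 lst st hst, pvGoB]
        simp [h]
    · intro lst v st hst
      have hst' : st % 2 = 1 := by rwa [hmod] at hst
      have hnd : ¬ (2 : Int) ∣ st := by omega
      by_cases h : pvIsDig c = true
      · have hstep : pvStepA (lst ++ [v], st) c = (lst ++ [v * 10 + pvDv c], st) := by
          simp [pvStepA, h, hnd, pvUpdateLast_append]
        rw [List.foldl_cons, hstep, ih.2 lst (v * 10 + pvDv c) st hst, pvExt]
        simp [h]
      · have hstep : pvStepA (lst ++ [v], st) c = (lst ++ [v], st + 1) := by
          simp [pvStepA, h]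
          omega
        rw [List.foldl_cons, hstep,
          ih.1 (lst ++ [v]) (st + 1) (by rw [hmod]; omega), pvExt]
        simp [h]

-- ===== VERDICT (by name: the statement is the Claim_ definition above) =====
theorem numberParser_spec : Claim_equal_numberParser := by
  intro mapSize _
  unfold Spec_numberParser numberParser numberParser_alt
  simpa using (pvKey mapSize.toList).1 [] 0 (by decide)
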